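-- pv_equiv track=rewrite | github.com/Numstore/numstore_docs | scripts/generate_docs.py | all_parents_in_order
-- ===== SOURCE A (Python) =====
-- from typing import List, Tuple, Set
--
-- def all_parents_in_order(nodes: List[Tuple[str, ...]]) -> List[Tuple[str, ...]]:
--     """Include every ancestor once, in first-appearance order."""
--     seen: Set[Tuple[str, ...]] = set()
--     out: List[Tuple[str, ...]] = []
--     for p in nodes:
--         for i in range(1, len(p) + 1):
--             sub = p[:i]
--             if sub not in seen:
--                 seen.add(sub)
--                 out.append(sub)
--     return out
-- ===== SOURCE B (Python) =====
-- def all_parents_in_order(nodes):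
--     """Include every ancestor once, in first-appearance order."""
--     prefixes = []
--     for p in nodes:
--         acc = ()
--         for x in p:
--             acc = acc + (x,)
--             prefixes.append(acc)
--     return list(dict.fromkeys(prefixes))
-- ===== Notes on version B (the rewrite author's own statement) =====
-- stated objective: idiomatic
-- what changed: B builds each node's prefixes by incremental tuple concatenation into one flat list (no slicing) and deduplicates in a single separate pass with dict.fromkeys, instead of A's per-prefix slicing with an interleaved seen-set check.
import Mathlib
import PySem

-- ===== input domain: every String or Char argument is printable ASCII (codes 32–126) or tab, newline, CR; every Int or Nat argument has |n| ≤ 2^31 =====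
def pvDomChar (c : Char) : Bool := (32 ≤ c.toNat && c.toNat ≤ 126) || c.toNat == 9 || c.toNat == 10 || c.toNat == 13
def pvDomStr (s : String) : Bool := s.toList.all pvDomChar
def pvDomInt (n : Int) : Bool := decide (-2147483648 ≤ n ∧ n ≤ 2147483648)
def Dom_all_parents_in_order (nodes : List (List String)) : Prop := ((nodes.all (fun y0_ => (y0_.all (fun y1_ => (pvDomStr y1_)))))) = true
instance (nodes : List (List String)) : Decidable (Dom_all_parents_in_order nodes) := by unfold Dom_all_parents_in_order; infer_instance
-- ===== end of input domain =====

-- B builds each node's prefixes by incremental concatenation into one flat list and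
-- deduplicates it in a single separate pass (dict.fromkeys), instead of A's per-prefix
-- slicing with an interleaved seen-set check; same cost, more idiomatic.


-- ===== PORT A =====
-- 'seen' is a Python set consumed only by membership tests, 'out' the returned list.
def all_parents_in_order (nodes : List (List String)) : List (List String) :=
  (nodes.foldl
    (fun (st : PySem.Set (List String) × List (List String)) p =>
      (PySem.List.pyRange 1 ((p.length : Int) + 1) 1).foldl
        (fun st i =>
          let sub := PySem.List.slice p none (some i)
          if PySem.Set.contains st.1 sub then st
          else (PySem.Set.add st.1 sub, st.2 ++ [sub]))
        st)
    (PySem.Set.empty, [])).2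

-- ===== PORT B =====
-- the inner loop of Source B: 'acc = acc + (x,); prefixes.append(acc)'
def pvPrefixes (p : List String) : List (List String) :=
  (p.foldl (fun (s : List String × List (List String)) x =>
      (s.1 ++ [x], s.2 ++ [s.1 ++ [x]])) ([], [])).2

def all_parents_in_order_alt (nodes : List (List String)) : List (List String) :=
  PySem.List.dedup (nodes.foldl (fun prefixes p => prefixes ++ pvPrefixes p) [])

-- ===== PRECONDITION & SPEC =====
def Spec_all_parents_in_order (nodes : List (List String)) (out : List (List String)) : Prop := out = all_parents_in_order_alt nodes
instance (nodes : List (List String)) (out : List (List String)) : Decidable (Spec_all_parents_in_order nodes out) := by unfold Spec_all_parents_in_order; infer_instance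

-- ===== CLAIM (what is proved, stated in full; the proofs are below) =====
def Claim_equal_all_parents_in_order : Prop := ∀ (nodes : List (List String)), Dom_all_parents_in_order nodes → Spec_all_parents_in_order nodes (all_parents_in_order nodes)

-- ===== LEMMAS AND PROOFS =====

-- the canonical prefix list both programs produce per node
def pvTakes (p : List String) : List (List String) :=
  (List.range p.length).map (fun k => p.take (k + 1))

-- B's inner loop computes pvTakes (generalized over both accumulators)
theorem pvPrefixes_go (p : List String) : ∀ (a : List String) (acc : List (List String)),
    (p.foldl (fun (s : List String × List (List String)) x =>
        (s.1 ++ [x], s.2 ++ [s.1 ++ [x]])) (a, acc)).2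
      = acc ++ (List.range p.length).map (fun k => a ++ p.take (k + 1)) := by
  induction p with
  | nil => intro a acc; simp
  | cons x p ih =>
      intro a acc
      simp only [List.foldl_cons, ih, List.length_cons, List.range_succ_eq_map,
        List.map_cons, List.map_map]
      simp [List.append_assoc, Function.comp_def]

theorem pvPrefixes_eq_takes (p : List String) : pvPrefixes p = pvTakes p := by
  simpa [pvPrefixes, pvTakes] using pvPrefixes_go p [] []

-- A's slices, enumerated by the range, are also pvTakes
theorem slices_eq_takes (p : List String) :
    (PySem.List.pyRange 1 ((p.length : Int) + 1) 1).map
      (fun i => PySem.List.slice p none (some i)) = pvTakes p := by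
  rw [PySem.List.pyRange_one]
  have hn : (((p.length : Int) + 1 - 1)).toNat = p.length := by omega
  rw [hn, List.map_map]
  refine List.map_congr_left (fun k hk => ?_)
  show PySem.List.slice p none (some (1 + (k : Int))) = p.take (k + 1)
  rw [show (1 : Int) + (k : Int) = ((k + 1 : Nat) : Int) from by push_cast; ring,
    PySem.List.slice_to_natCast]

-- A's dedup step keeps the two accumulators equal: on a state (s, s) it is Set.add on both
theorem a_step_pair (l : List (List String)) : ∀ (s : PySem.Set (List String)),
    l.foldl (fun st sub =>
        if PySem.Set.contains st.1 sub then st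
        else (PySem.Set.add st.1 sub, st.2 ++ [sub])) (s, s)
      = (l.foldl PySem.Set.add s, l.foldl PySem.Set.add s) := by
  have hstep : ∀ (s : PySem.Set (List String)) (sub : List String),
      (if PySem.Set.contains s sub then ((s, s) : PySem.Set (List String) × List (List String))
       else (PySem.Set.add s sub, s ++ [sub]))
        = (PySem.Set.add s sub, PySem.Set.add s sub) := by
    intro s sub
    by_cases h : sub ∈ s <;> simp [PySem.Set.add, PySem.Set.contains, h]
  induction l with
  | nil => intro s; rfl
  | cons x l ih =>
      intro s
      simp only [List.foldl_cons]
      rw [show (if PySem.Set.contains (s, s).1 x then ((s, s) : PySem.Set (List String) × List (List String))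
            else (PySem.Set.add (s, s).1 x, (s, s).2 ++ [x])) = (PySem.Set.add s x, PySem.Set.add s x) from hstep s x]
      exact ih _

-- ===== VERDICT (by name: the statement is the Claim_ definition above) =====
theorem all_parents_in_order_spec : Claim_equal_all_parents_in_order := by
  intro nodes _
  unfold Spec_all_parents_in_order all_parents_in_order all_parents_in_order_alt
  -- rewrite A's inner range-loop as a loop over pvTakes
  have inner : ∀ (p : List String) (st : PySem.Set (List String) × List (List String)),
      (PySem.List.pyRange 1 ((p.length : Int) + 1) 1).foldl
        (fun st i =>
          let sub := PySem.List.slice p none (some i)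
          if PySem.Set.contains st.1 sub then st
          else (PySem.Set.add st.1 sub, st.2 ++ [sub])) st
      = (pvTakes p).foldl (fun st sub =>
          if PySem.Set.contains st.1 sub then st
          else (PySem.Set.add st.1 sub, st.2 ++ [sub])) st := by
    intro p st
    rw [← slices_eq_takes, List.foldl_map]
  simp only [inner]
  rw [← List.foldl_flatMap]
  rw [PySem.List.foldl_append_eq_flatMap]
  rw [show pvPrefixes = pvTakes from funext pvPrefixes_eq_takes]
  rw [show ((PySem.Set.empty : PySem.Set (List String)), ([] : List (List String)))
        = (PySem.Set.empty, PySem.Set.empty) from rfl,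
    a_step_pair (nodes.flatMap pvTakes) PySem.Set.empty]
  simp [PySem.List.dedup_eq_ofList, PySem.Set.ofList_eq_foldl]
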